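-- pv_equiv track=rewrite | github.com/jschuel/jeff_workspace | analysis/old/sven_cluster.py | find_gaps_1d
-- ===== SOURCE A (Python) =====
-- def find_gaps_1d (positions):
--     gaps = []
--     gapsize = 0
--     # move through all positions and search for gap
--     for x in range(min(positions), max(positions)+1, 1):
--         if not x in positions:
--             gapsize +=1
--         elif gapsize > 0:
--             gaps += [gapsize]
--             gapsize = 0
--     return gaps
-- ===== SOURCE B (Python) =====
-- def find_gaps_1d(positions):
--     xs = sorted(set(positions))
--     return [b - a - 1 for a, b in zip(xs, xs[1:]) if b - a > 1]
-- ===== Notes on version B (the rewrite author's own statement) =====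
-- stated objective: faster
-- what changed: Replaces the scan of every integer between min and max (with an O(n) membership test per integer) by sorting the distinct positions once and emitting (consecutive difference - 1) for each positive gap.
-- outside the precondition, e.g. on find_gaps_1d([]): A raises ValueError, B returns []
import Mathlib
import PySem

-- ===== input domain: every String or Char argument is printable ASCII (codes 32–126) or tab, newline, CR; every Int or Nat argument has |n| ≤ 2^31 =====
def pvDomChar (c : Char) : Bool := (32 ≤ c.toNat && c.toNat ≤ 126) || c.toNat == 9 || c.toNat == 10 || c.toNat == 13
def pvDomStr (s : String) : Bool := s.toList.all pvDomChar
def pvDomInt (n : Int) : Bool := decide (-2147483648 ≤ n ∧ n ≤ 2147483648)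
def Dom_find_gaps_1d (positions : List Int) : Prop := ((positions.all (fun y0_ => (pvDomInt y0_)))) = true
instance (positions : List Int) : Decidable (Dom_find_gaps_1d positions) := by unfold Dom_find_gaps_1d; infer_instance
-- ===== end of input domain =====

-- B sorts the distinct positions once and reads each gap off consecutive differences,
-- instead of A's scan of every integer from min to max with a membership test each.

-- ===== PORT A =====
-- the loop body of A: 'if not x in positions: gapsize += 1 elif gapsize > 0: gaps += [gapsize]; gapsize = 0'
def pvStep (mem : List Int) (s : List Int × Int) (x : Int) : List Int × Int :=
  if ¬ x ∈ mem then (s.1, s.2 + 1)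
  else if s.2 > 0 then (s.1 ++ [s.2], 0)
  else s

def find_gaps_1d (positions : List Int) : List Int :=
  match PySem.List.min? positions (fun x => x), PySem.List.max? positions (fun x => x) with
  | some mn, some mx =>
      ((PySem.List.pyRange mn (mx + 1) 1).foldl (pvStep positions) ([], 0)).1
  | _, _ => []    -- unreachable under Pre_: Python's min(positions) raises ValueError on []

-- ===== PORT B =====
-- the comprehension '[b - a - 1 for a, b in zip(xs, xs[1:]) if b - a > 1]'
def pvScan (xs : List Int) : List Int :=
  (xs.zip (xs.drop 1)).filterMap (fun p => if p.2 - p.1 > 1 then some (p.2 - p.1 - 1) else none)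

def find_gaps_1d_alt (positions : List Int) : List Int :=
  pvScan (PySem.List.sorted (PySem.Set.ofList positions) (fun x => x) false)

-- ===== PRECONDITION & SPEC =====
-- Python A raises ValueError (min/max of an empty sequence) on []; excluded.
def Pre_find_gaps_1d (positions : List Int) : Prop := positions ≠ []
instance (positions : List Int) : Decidable (Pre_find_gaps_1d positions) := by unfold Pre_find_gaps_1d; infer_instance
def pvWitness_find_gaps_1d : List Int := [0]

def Spec_find_gaps_1d (positions : List Int) (out : List Int) : Prop := out = find_gaps_1d_alt positions
instance (positions : List Int) (out : List Int) : Decidable (Spec_find_gaps_1d positions out) := by unfold Spec_find_gaps_1d; infer_instance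

-- ===== CLAIM (what is proved, stated in full; the proofs are below) =====
def Claim_equal_find_gaps_1d : Prop := ∀ (positions : List Int), Dom_find_gaps_1d positions → Pre_find_gaps_1d positions → Spec_find_gaps_1d positions (find_gaps_1d positions)

-- ===== LEMMAS AND PROOFS =====

-- membership in positions may be replaced by membership in any list with the same members
theorem pvStep_congr (xs ys : List Int) (h : ∀ x, x ∈ xs ↔ x ∈ ys) : pvStep xs = pvStep ys := by
  funext s x
  simp only [pvStep, h]

-- a stretch of values none of which is a position only increments gapsize
theorem pvFold_miss (ys : List Int) (l : List Int) (s : List Int × Int)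
    (h : ∀ x ∈ l, x ∉ ys) :
    l.foldl (pvStep ys) s = (s.1, s.2 + l.length) := by
  induction l generalizing s with
  | nil => simp
  | cons a l ih =>
    have ha : a ∉ ys := h a (by simp)
    simp only [List.foldl_cons, pvStep, ha, not_false_iff, if_pos, List.length_cons]
    rw [ih _ (fun x hx => h x (by simp [hx]))]
    simp only [Prod.mk.injEq, true_and]
    push_cast; ring

-- the last element of a strictly increasing list bounds all its elements
theorem pvLast_ge : ∀ (ys : List Int), ys.Pairwise (· < ·) → ∀ (hne : ys ≠ []),
    ∀ y ∈ ys, y ≤ ys.getLast hne := by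
  intro ys
  induction ys with
  | nil => intro _ hne; simp at hne
  | cons a t ih =>
    intro hp hne y hy
    rcases t with _ | ⟨b, t'⟩
    · simp at hy; simp [hy]
    · have hp' := (List.pairwise_cons.mp hp)
      rw [List.getLast_cons (by simp)]
      rcases List.mem_cons.mp hy with h | h
      · subst h
        exact le_trans (le_of_lt (hp'.1 b (by simp))) (ih hp'.2 (by simp) b (by simp))
      · exact ih hp'.2 (by simp) y h

theorem pvScan_cons2 (y z : Int) (t : List Int) :
    pvScan (y :: z :: t) = (if z - y > 1 then [z - y - 1] else []) ++ pvScan (z :: t) := by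
  by_cases h : z - y > 1
  · simp [pvScan, h]
  · simp [pvScan, h]

-- main loop invariant: resuming A's scan just after position y, with suffix (y :: t) of the
-- strictly increasing position list still ahead, appends exactly the consecutive-difference gaps
theorem pvMain (ys : List Int) (hp : ys.Pairwise (· < ·)) (t : List Int) :
    ∀ (y : Int) (g : List Int), (y :: t) <:+ ys →
    (PySem.List.pyRange (y + 1) ((y :: t).getLast (by simp) + 1) 1).foldl (pvStep ys) (g, 0)
      = (g ++ pvScan (y :: t), 0) := by
  induction t with
  | nil =>
    intro y g _
    rw [List.getLast_singleton, PySem.List.pyRange_one_eq_nil (by omega)]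
    simp [pvScan]
  | cons z t' ih =>
    intro y g hsuff
    obtain ⟨pre, hpre⟩ := hsuff
    have hpw : (pre ++ y :: z :: t').Pairwise (· < ·) := by rw [hpre]; exact hp
    have hcross := (List.pairwise_append.mp hpw).2.2
    have hyz : y < z := by
      have := (List.pairwise_append.mp hpw).2.1
      exact (List.pairwise_cons.mp this).1 z (by simp)
    have hzt : (z :: t').Pairwise (· < ·) :=
      ((List.pairwise_cons.mp (List.pairwise_append.mp hpw).2.1).2)
    have hzle : z ≤ (z :: t').getLast (by simp) := pvLast_ge _ hzt (by simp) z (by simp)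
    have hglast : (y :: z :: t').getLast (by simp) = (z :: t').getLast (by simp) :=
      List.getLast_cons (by simp)
    rw [hglast]
    set L := (z :: t').getLast (by simp) with hL
    -- split the range at z
    rw [PySem.List.pyRange_one_append (y + 1) z (L + 1) (by omega) (by omega),
        List.foldl_append]
    -- the stretch (y+1 .. z-1) misses every position
    have hmiss : ∀ x ∈ PySem.List.pyRange (y + 1) z 1, x ∉ ys := by
      intro x hx
      rw [PySem.List.mem_pyRange_one] at hx
      rw [← hpre]
      intro hmem
      rcases List.mem_append.mp hmem with h | h
      · exact absurd (hcross x h y (by simp)) (by omega)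
      · rcases List.mem_cons.mp h with h | h
        · omega
        · rcases List.mem_cons.mp h with h | h
          · omega
          · have := (List.pairwise_cons.mp hzt).1 x h
            omega
    rw [pvFold_miss ys _ _ hmiss]
    have hlen : (0 : Int) + (PySem.List.pyRange (y + 1) z 1).length = z - y - 1 := by
      rw [PySem.List.length_pyRange_one]; omega
    rw [hlen]
    -- step at z, a member, flushing the accumulated gapsize
    have hzmem : z ∈ ys := by rw [← hpre]; simp
    rw [PySem.List.pyRange_one_cons (by omega), List.foldl_cons]
    have hsuff' : (z :: t') <:+ ys := ⟨pre ++ [y], by simpa using hpre⟩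
    by_cases hgap : z - y - 1 > 0
    · have hstepz : pvStep ys (g, z - y - 1) z = (g ++ [z - y - 1], 0) := by
        unfold pvStep
        rw [if_neg (not_not_intro hzmem), if_pos hgap]
      rw [hstepz, ih z (g ++ [z - y - 1]) hsuff', pvScan_cons2,
          if_pos (show z - y > 1 by omega)]
      simp
    · have hz0 : z - y - 1 = 0 := by omega
      have hstepz : pvStep ys (g, z - y - 1) z = (g, 0) := by
        unfold pvStep
        rw [hz0, if_neg (not_not_intro hzmem), if_neg (by simp : ¬ (0:Int) > 0)]
      rw [hstepz, ih z g hsuff', pvScan_cons2, if_neg (show ¬ z - y > 1 by omega)]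
      simp

-- ===== VERDICT (by name: the statement is the Claim_ definition above) =====
theorem find_gaps_1d_spec : Claim_equal_find_gaps_1d := by
  intro positions _ hpre
  unfold Spec_find_gaps_1d find_gaps_1d find_gaps_1d_alt
  set ys := PySem.List.sorted (PySem.Set.ofList positions) (fun x => x) false with hys
  have hmem : ∀ x, x ∈ positions ↔ x ∈ ys := by
    intro x
    rw [hys, PySem.List.mem_sorted, PySem.Set.mem_ofList]
  have hp : ys.Pairwise (· < ·) := PySem.List.sorted_ofList_pairwise_lt positions
  have hysne : ys ≠ [] := by
    obtain ⟨a, rest, hrest⟩ := List.exists_cons_of_ne_nil hpre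
    intro h
    have ha : a ∈ ys := (hmem a).mp (by rw [hrest]; simp)
    rw [h] at ha; simp at ha
  obtain ⟨y, t, hyt⟩ := List.exists_cons_of_ne_nil hysne
  -- min(positions) is the head of the sorted distinct list
  obtain ⟨m, hm⟩ : ∃ m, PySem.List.min? positions (fun x => x) = some m := by
    cases h : PySem.List.min? positions (fun x => x) with
    | none => exact absurd ((PySem.List.min?_eq_none_iff _ _).mp h) hpre
    | some m => exact ⟨m, rfl⟩
  have hmy : m = y := by
    have h1 : m ∈ positions := PySem.List.min?_mem hm
    have h2 : ∀ x ∈ positions, m ≤ x := PySem.List.min?_isMin hm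
    have h3 : y ∈ positions := (hmem y).mpr (by rw [hyt]; simp)
    have h4 : m ≤ y := h2 y h3
    have h5 : y ≤ m := by
      have := PySem.List.key_head_sorted_le (xs := PySem.Set.ofList positions)
        (key := fun x => x) (by rw [← hys, hyt])
      exact this m ((PySem.Set.mem_ofList _ _).mpr h1)
    omega
  -- max(positions) is the last of the sorted distinct list
  obtain ⟨M, hM⟩ : ∃ M, PySem.List.max? positions (fun x => x) = some M := by
    cases h : PySem.List.max? positions (fun x => x) with
    | none => exact absurd ((PySem.List.max?_eq_none_iff _ _).mp h) hpre
    | some M => exact ⟨M, rfl⟩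
  have hML : M = ys.getLast hysne := by
    have h1 : M ∈ positions := PySem.List.max?_mem hM
    have h2 : ∀ x ∈ positions, x ≤ M := PySem.List.max?_isMax hM
    have h3 : ys.getLast hysne ∈ positions := (hmem _).mpr (List.getLast_mem hysne)
    have h4 : ys.getLast hysne ≤ M := h2 _ h3
    have h5 : M ≤ ys.getLast hysne := pvLast_ge ys hp hysne M ((hmem M).mp h1)
    omega
  rw [hmy] at hm
  rw [hML] at hM
  rw [hm, hM]
  rw [pvStep_congr positions ys hmem]
  show ((PySem.List.pyRange y (ys.getLast hysne + 1) 1).foldl (pvStep ys) ([], 0)).1 = pvScan ys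
  have hylast : y ≤ ys.getLast hysne := pvLast_ge ys hp hysne y (by rw [hyt]; simp)
  have hymem : y ∈ ys := by rw [hyt]; simp
  have hstep : pvStep ys ([], 0) y = ([], 0) := by simp [pvStep, hymem]
  rw [PySem.List.pyRange_one_cons (by omega), List.foldl_cons, hstep]
  have hlast : ys.getLast hysne = (y :: t).getLast (by simp) := by
    congr 1
  rw [hlast, pvMain ys hp t y [] (by rw [hyt])]
  simp [hyt]
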